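-- pv_equiv track=rewrite | github.com/MrBrantCode/unitest_baseline | mut_generate/mist_train_cf/cf_50830/solution.py | find_hex_cluster
-- ===== SOURCE A (Python) =====
-- def find_hex_cluster(hex_string, target_product):
--     """
--     Finds a substring in hex_string where the product of its hexadecimal digits equals target_product.
--
--     Args:
--     hex_string (str): A sequence of hexadecimal numbers.
--     target_product (int): The pre-established result.
--
--     Returns:
--     str: A substring of hex_string that meets the condition, or an empty string if no such substring exists.
--     """
--     def hex_to_int(hex_char):
--         # Convert a hexadecimal character to its integer value
--         return int(hex_char, 16)
--
--     for length in range(1, len(hex_string) + 1):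
--         for i in range(len(hex_string) - length + 1):
--             substring = hex_string[i:i + length]
--             product = 1
--             for char in substring:
--                 product *= hex_to_int(char)
--             if product == target_product:
--                 return substring
--
--     return ""
-- ===== SOURCE B (Python) =====
-- def find_hex_cluster(hex_string, target_product):
--     """Shortest (leftmost on ties) substring whose hex-digit product equals target_product.
--
--     One pass per start index with an incremental running product: O(n^2)
--     instead of A's O(n^3) substring-times-product rescan.
--     """
--     n = len(hex_string)
--     best = None  # (length, start), lexicographically minimal
--     for i in range(n):
--         product = 1
--         for j in range(i, n):
--             product *= int(hex_string[j], 16)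
--             if product == target_product:
--                 cand = (j - i + 1, i)
--                 if best is None or cand < best:
--                     best = cand
--                 break  # longer substrings from this start can only be worse
--     if best is None:
--         return ""
--     length, start = best
--     return hex_string[start:start + length]
-- ===== Notes on version B (the rewrite author's own statement) =====
-- stated objective: faster
-- what changed: Replaced the triple loop (every length, every start, rescan the substring to multiply its digits) by a single incremental scan per start index that maintains a running product and keeps the lexicographically minimal (length, start) match, breaking the inner scan at the first match per start.
-- outside the precondition, e.g. on find_hex_cluster('5x', 5): A returns '5', B raises ValueError
import Mathlib
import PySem

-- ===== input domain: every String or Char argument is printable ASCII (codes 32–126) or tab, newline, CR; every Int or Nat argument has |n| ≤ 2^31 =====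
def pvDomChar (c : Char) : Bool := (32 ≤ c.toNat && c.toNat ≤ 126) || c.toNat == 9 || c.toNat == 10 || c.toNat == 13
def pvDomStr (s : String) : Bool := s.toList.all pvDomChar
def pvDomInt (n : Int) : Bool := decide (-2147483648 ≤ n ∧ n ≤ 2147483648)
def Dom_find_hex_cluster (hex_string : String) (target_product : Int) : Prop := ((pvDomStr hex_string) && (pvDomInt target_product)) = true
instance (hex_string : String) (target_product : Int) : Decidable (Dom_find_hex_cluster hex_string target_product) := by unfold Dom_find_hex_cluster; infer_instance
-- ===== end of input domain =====

-- B replaces A's triple loop (every length, every start, rescan the substring's product) by one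
-- incremental running-product scan per start index keeping the lexicographically minimal
-- (length, start) match: a different, O(n^2) instead of O(n^3), algorithm with the same result.

-- ===== PORT A =====

-- int(c, 16) for a single hex-digit character; exact on hex digits (Pre_ admits only those:
-- on any other single character Python's int(c, 16) raises ValueError).
def pvHexVal (c : Char) : Int :=
  if 48 ≤ c.toNat ∧ c.toNat ≤ 57 then (c.toNat : Int) - 48
  else if 97 ≤ c.toNat ∧ c.toNat ≤ 102 then (c.toNat : Int) - 87
  else if 65 ≤ c.toNat ∧ c.toNat ≤ 70 then (c.toNat : Int) - 55
  else 0

-- A's innermost loop: product = 1; for char in substring: product *= hex_to_int(char)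
def pvHexProd (l : List Char) : Int := l.foldl (fun p c => p * pvHexVal c) 1

-- A's loop over i (for fixed length L): first matching substring hex_string[i:i+L], else none
def pvAInner (cs : List Char) (t : Int) (L : Nat) : List Nat → Option (List Char)
  | [] => none
  | i :: rest =>
      let sub := PySem.List.slice cs (some (i : Int)) (some ((i : Int) + (L : Int)))
      if pvHexProd sub = t then some sub else pvAInner cs t L rest

-- A's loop over length: for length in range(1, n+1): for i in range(n - length + 1): …
def pvAOuter (cs : List Char) (t : Int) (n : Nat) : List Nat → Option (List Char)
  | [] => none
  | L :: rest =>
      match pvAInner cs t L (List.range (n - L + 1)) with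
      | some s => some s
      | none => pvAOuter cs t n rest

def find_hex_cluster (hex_string : String) (target_product : Int) : String :=
  let cs := hex_string.toList
  match pvAOuter cs target_product cs.length (List.range' 1 cs.length) with
  | some s => String.ofList s
  | none => ""

-- ===== PORT B =====

-- B's inner loop: running product over j = i, i+1, …, n-1; first match returns (j-i+1, i) (the break)
def pvBInner (cs : List Char) (t : Int) (i : Nat) (p : Int) : List Nat → Option (Nat × Nat)
  | [] => none
  | j :: rest =>
      let p' := p * pvHexVal (PySem.List.pyGetD cs (j : Int) ' ')
      if p' = t then some (j - i + 1, i) else pvBInner cs t i p' rest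

-- Python's tuple comparison cand < best on (length, start)
def pvLess (c b : Nat × Nat) : Bool := c.1 < b.1 || (c.1 == b.1 && c.2 < b.2)

-- B's outer loop: for i in range(n), updating best with the per-start first match
def pvBOuter (cs : List Char) (t : Int) (n : Nat) (best : Option (Nat × Nat)) : List Nat → Option (Nat × Nat)
  | [] => best
  | i :: rest =>
      let best' :=
        match pvBInner cs t i 1 (List.range' i (n - i)) with
        | none => best
        | some cand =>
            match best with
            | none => some cand
            | some b => if pvLess cand b then some cand else some b
      pvBOuter cs t n best' rest

def find_hex_cluster_alt (hex_string : String) (target_product : Int) : String :=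
  let cs := hex_string.toList
  match pvBOuter cs target_product cs.length none (List.range cs.length) with
  | none => ""
  | some (L, s) => String.ofList (PySem.List.slice cs (some (s : Int)) (some ((s : Int) + (L : Int))))

-- ===== PRECONDITION & SPEC =====

def pvIsHexDigit (c : Char) : Bool :=
  (48 ≤ c.toNat && c.toNat ≤ 57) || (97 ≤ c.toNat && c.toNat ≤ 102) || (65 ≤ c.toNat && c.toNat ≤ 70)

-- Pre_ requires every character to be a hexadecimal digit: on any other character int(c, 16)
-- raises ValueError, so Python A raises on almost all such strings, and B (which reads every
-- character) always raises there.  This excludes a few inputs on which A still returns — strings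
-- where some substring lying entirely before the first bad character matches first in A's
-- length-then-start order (e.g. ("5x", 5): A returns "5", B raises ValueError); B cannot match those.
def Pre_find_hex_cluster (hex_string : String) (target_product : Int) : Prop :=
  hex_string.toList.all pvIsHexDigit = true

instance (hex_string : String) (target_product : Int) : Decidable (Pre_find_hex_cluster hex_string target_product) := by
  unfold Pre_find_hex_cluster; infer_instance

def pvWitness_find_hex_cluster : String × Int := ("aB3", 11)

def Spec_find_hex_cluster (hex_string : String) (target_product : Int) (out : String) : Prop := out = find_hex_cluster_alt hex_string target_product
instance (hex_string : String) (target_product : Int) (out : String) : Decidable (Spec_find_hex_cluster hex_string target_product out) := by unfold Spec_find_hex_cluster; infer_instance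

-- ===== CLAIM (what is proved, stated in full; the proofs are below) =====
def Claim_equal_find_hex_cluster : Prop := ∀ (hex_string : String) (target_product : Int), Dom_find_hex_cluster hex_string target_product → Pre_find_hex_cluster hex_string target_product → Spec_find_hex_cluster hex_string target_product (find_hex_cluster hex_string target_product)

-- ===== LEMMAS AND PROOFS =====

-- the substring hex_string[i:i+L], in drop/take form
def pvSub (cs : List Char) (i L : Nat) : List Char := (cs.drop i).take L

-- "the digits of hex_string[i:i+L] multiply to t"
def pvP (cs : List Char) (t : Int) (i L : Nat) : Prop := pvHexProd (pvSub cs i L) = t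

-- the common characterization: o is the lexicographically-minimal (length, start) match (or none)
def pvIsBest (cs : List Char) (t : Int) (o : Option (Nat × Nat)) : Prop :=
  match o with
  | none => ∀ L i, 1 ≤ L → i + L ≤ cs.length → ¬ pvP cs t i L
  | some x => 1 ≤ x.1 ∧ x.2 + x.1 ≤ cs.length ∧ pvP cs t x.2 x.1 ∧
      ∀ L i, 1 ≤ L → i + L ≤ cs.length → pvP cs t i L → (x.1 < L ∨ (x.1 = L ∧ x.2 ≤ i))

theorem pvIsBest_unique (cs : List Char) (t : Int) {o₁ o₂ : Option (Nat × Nat)}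
    (h₁ : pvIsBest cs t o₁) (h₂ : pvIsBest cs t o₂) : o₁ = o₂ := by
  cases o₁ with
  | none =>
    cases o₂ with
    | none => rfl
    | some y => exact absurd h₂.2.2.1 (h₁ y.1 y.2 h₂.1 h₂.2.1)
  | some x =>
    cases o₂ with
    | none => exact absurd h₁.2.2.1 (h₂ x.1 x.2 h₁.1 h₁.2.1)
    | some y =>
      obtain ⟨hx1, hx2, hxP, hxm⟩ := h₁
      obtain ⟨hy1, hy2, hyP, hym⟩ := h₂
      have hxy := hxm y.1 y.2 hy1 hy2 hyP
      have hyx := hym x.1 x.2 hx1 hx2 hxP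
      have e1 : x.1 = y.1 := by omega
      have e2 : x.2 = y.2 := by omega
      simp [Prod.ext_iff, e1, e2]

theorem pvSlice_eq_sub (cs : List Char) (i L : Nat) :
    PySem.List.slice cs (some (i : Int)) (some ((i : Int) + (L : Int))) = pvSub cs i L :=
  PySem.List.slice_natCast_add ..

-- ===== A-side characterization =====

theorem pvAInner_none (cs : List Char) (t : Int) (L : Nat) :
    ∀ (k a : Nat), pvAInner cs t L (List.range' a k) = none →
      ∀ i, a ≤ i → i < a + k → ¬ pvP cs t i L := by
  intro k
  induction k with
  | zero => intro a _ i h1 h2; omega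
  | succ k ih =>
    intro a h i h1 h2
    rw [List.range'_succ, pvAInner] at h
    simp only [pvSlice_eq_sub] at h
    split at h
    case isTrue => exact absurd h (by simp)
    case isFalse hne =>
      rcases Nat.eq_or_lt_of_le h1 with rfl | hlt
      · exact fun hP => hne hP
      · exact ih (a + 1) h i hlt (by omega)

theorem pvAInner_some (cs : List Char) (t : Int) (L : Nat) :
    ∀ (k a : Nat) (s : List Char), pvAInner cs t L (List.range' a k) = some s →
      ∃ i, a ≤ i ∧ i < a + k ∧ pvP cs t i L ∧ s = pvSub cs i L ∧
        ∀ i', a ≤ i' → i' < i → ¬ pvP cs t i' L := by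
  intro k
  induction k with
  | zero => intro a s h; simp [pvAInner] at h
  | succ k ih =>
    intro a s h
    rw [List.range'_succ, pvAInner] at h
    simp only [pvSlice_eq_sub] at h
    split at h
    case isTrue heq =>
      refine ⟨a, le_refl a, by omega, heq, by simpa using h.symm, ?_⟩
      intro i' h1 h2; omega
    case isFalse hne =>
      obtain ⟨i, hi1, hi2, hiP, hs, hmin⟩ := ih (a + 1) s h
      refine ⟨i, by omega, by omega, hiP, hs, ?_⟩
      intro i' h1 h2
      rcases Nat.eq_or_lt_of_le h1 with rfl | hlt
      · exact fun hP => hne hP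
      · exact hmin i' hlt h2

theorem pvAOuter_none (cs : List Char) (t : Int) (n : Nat) :
    ∀ (k a : Nat), a + k ≤ n + 1 → pvAOuter cs t n (List.range' a k) = none →
      ∀ L i, a ≤ L → L < a + k → i + L ≤ n → ¬ pvP cs t i L := by
  intro k
  induction k with
  | zero => intro a _ _ L i h1 h2; omega
  | succ k ih =>
    intro a hk h L i h1 h2 h3
    rw [List.range'_succ, pvAOuter] at h
    split at h
    next s' heq => exact absurd h (by simp)
    next heq =>
      rcases Nat.eq_or_lt_of_le h1 with rfl | hlt
      · exact pvAInner_none cs t a (n - a + 1) 0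
          (by rw [← List.range_eq_range']; exact heq) i (by omega) (by omega)
      · exact ih (a + 1) (by omega) h L i hlt (by omega) h3

theorem pvAOuter_some (cs : List Char) (t : Int) (n : Nat) :
    ∀ (k a : Nat) (s : List Char), a + k ≤ n + 1 → pvAOuter cs t n (List.range' a k) = some s →
      ∃ L i, a ≤ L ∧ L < a + k ∧ i + L ≤ n ∧ pvP cs t i L ∧ s = pvSub cs i L ∧
        (∀ L' i', a ≤ L' → L' < L → i' + L' ≤ n → ¬ pvP cs t i' L') ∧
        (∀ i', i' < i → ¬ pvP cs t i' L) := by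
  intro k
  induction k with
  | zero => intro a s _ h; simp [pvAOuter] at h
  | succ k ih =>
    intro a s hk h
    rw [List.range'_succ, pvAOuter] at h
    split at h
    next s' heq =>
      injection h with h'
      subst h'
      obtain ⟨i, _, hi2, hiP, hs, hmin⟩ :=
        pvAInner_some cs t a (n - a + 1) 0 s' (by rw [← List.range_eq_range']; exact heq)
      refine ⟨a, i, le_refl a, by omega, by omega, hiP, hs, ?_, ?_⟩
      · intro L' i' hL1 hL2; omega
      · intro i' hi'; exact hmin i' (by omega) hi'
    next heq =>
      obtain ⟨L, i, hL1, hL2, hLn, hP, hs, hminL, hmini⟩ := ih (a + 1) s (by omega) h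
      refine ⟨L, i, by omega, by omega, hLn, hP, hs, ?_, hmini⟩
      intro L' i' h1 h2 h3
      rcases Nat.eq_or_lt_of_le h1 with rfl | hlt
      · exact pvAInner_none cs t a (n - a + 1) 0
          (by rw [← List.range_eq_range']; exact heq) i' (by omega) (by omega)
      · exact hminL L' i' hlt h2 h3

-- ===== B-side characterization =====

theorem pvHexProd_snoc (u : List Char) (x : Char) :
    pvHexProd (u ++ [x]) = pvHexProd u * pvHexVal x := by
  simp [pvHexProd, List.foldl_append]

theorem pvSub_succ (cs : List Char) (i j : Nat) (hij : i ≤ j) (hj : j < cs.length) :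
    pvSub cs i (j - i + 1) = pvSub cs i (j - i) ++ [(cs[j]?).getD ' '] := by
  unfold pvSub
  rw [List.take_add_one, List.getElem?_drop, (by omega : i + (j - i) = j),
    List.getElem?_eq_getElem hj]
  simp

theorem pvBInner_none (cs : List Char) (t : Int) (i : Nat) :
    ∀ (k j : Nat) (p : Int), i ≤ j → j + k = cs.length →
      p = pvHexProd (pvSub cs i (j - i)) →
      pvBInner cs t i p (List.range' j k) = none →
      ∀ L, 1 ≤ L → j - i < L → i + L ≤ cs.length → ¬ pvP cs t i L := by
  intro k
  induction k with
  | zero => intro j p _ hjk _ _ L _ h2 h3; omega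
  | succ k ih =>
    intro j p hij hjk hp h L hL1 hL2 hL3
    rw [List.range'_succ, pvBInner] at h
    simp only [PySem.List.pyGetD_natCast, List.getD_eq_getElem?_getD] at h
    split at h
    case isTrue => exact absurd h (by simp)
    case isFalse hne =>
      have hjlt : j < cs.length := by omega
      have hp' : p * pvHexVal ((cs[j]?).getD ' ') = pvHexProd (pvSub cs i (j + 1 - i)) := by
        rw [hp, (by omega : j + 1 - i = j - i + 1), pvSub_succ cs i j hij hjlt, pvHexProd_snoc]
      rcases Nat.lt_or_ge (j + 1 - i) L with hlt | hge
      · exact ih (j + 1) _ (by omega) (by omega) hp' h L hL1 (by omega) hL3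
      · have hLeq : L = j - i + 1 := by omega
        intro hP
        apply hne
        rw [hp', (by omega : j + 1 - i = j - i + 1), ← hLeq]
        exact hP

theorem pvBInner_some (cs : List Char) (t : Int) (i : Nat) :
    ∀ (k j : Nat) (p : Int) (c : Nat × Nat), i ≤ j → j + k = cs.length →
      p = pvHexProd (pvSub cs i (j - i)) →
      pvBInner cs t i p (List.range' j k) = some c →
      ∃ j₀, j ≤ j₀ ∧ j₀ < cs.length ∧ c = (j₀ - i + 1, i) ∧ pvP cs t i (j₀ - i + 1) ∧
        ∀ L, 1 ≤ L → j - i < L → L < j₀ - i + 1 → ¬ pvP cs t i L := by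
  intro k
  induction k with
  | zero => intro j p c _ _ _ h; simp [pvBInner] at h
  | succ k ih =>
    intro j p c hij hjk hp h
    rw [List.range'_succ, pvBInner] at h
    simp only [PySem.List.pyGetD_natCast, List.getD_eq_getElem?_getD] at h
    have hjlt : j < cs.length := by omega
    have hp' : p * pvHexVal ((cs[j]?).getD ' ') = pvHexProd (pvSub cs i (j + 1 - i)) := by
      rw [hp, (by omega : j + 1 - i = j - i + 1), pvSub_succ cs i j hij hjlt, pvHexProd_snoc]
    split at h
    case isTrue heq =>
      have hc : c = (j - i + 1, i) := by simpa using h.symm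
      refine ⟨j, le_refl j, hjlt, hc, ?_, ?_⟩
      · show pvHexProd (pvSub cs i (j - i + 1)) = t
        rw [(by omega : j - i + 1 = j + 1 - i), ← hp']
        exact heq
      · intro L _ h2 h3; omega
    case isFalse hne =>
      obtain ⟨j₀, hj₀1, hj₀2, hc, hP, hmin⟩ := ih (j + 1) _ c (by omega) (by omega) hp' h
      refine ⟨j₀, by omega, hj₀2, hc, hP, ?_⟩
      intro L hL1 hL2 hL3
      rcases Nat.lt_or_ge (j + 1 - i) L with hlt | hge
      · exact hmin L hL1 (by omega) hL3
      · have hLeq : L = j - i + 1 := by omega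
        intro hQ
        apply hne
        rw [hp', (by omega : j + 1 - i = j - i + 1), ← hLeq]
        exact hQ

-- the outer-loop invariant: best is the lex-min match among starts < i
def pvInv (cs : List Char) (t : Int) (i : Nat) (best : Option (Nat × Nat)) : Prop :=
  match best with
  | none => ∀ L i', 1 ≤ L → i' + L ≤ cs.length → i' < i → ¬ pvP cs t i' L
  | some x => 1 ≤ x.1 ∧ x.2 + x.1 ≤ cs.length ∧ x.2 < i ∧ pvP cs t x.2 x.1 ∧
      ∀ L i', 1 ≤ L → i' + L ≤ cs.length → i' < i → pvP cs t i' L → (x.1 < L ∨ (x.1 = L ∧ x.2 ≤ i'))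

theorem pvLess_iff (c b : Nat × Nat) :
    pvLess c b = true ↔ (c.1 < b.1 ∨ (c.1 = b.1 ∧ c.2 < b.2)) := by
  simp [pvLess]

theorem pvBOuter_spec (cs : List Char) (t : Int) :
    ∀ (k i : Nat) (best : Option (Nat × Nat)), i + k = cs.length → pvInv cs t i best →
      pvIsBest cs t (pvBOuter cs t cs.length best (List.range' i k)) := by
  intro k
  induction k with
  | zero =>
    intro i best hik hinv
    show pvIsBest cs t (pvBOuter cs t cs.length best [])
    rw [pvBOuter]
    cases best with
    | none => exact fun L i' h1 h2 => hinv L i' h1 h2 (by omega)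
    | some x =>
      obtain ⟨h1, h2, _, h4, h5⟩ := hinv
      exact ⟨h1, h2, h4, fun L i' hL hn hP => h5 L i' hL hn (by omega) hP⟩
  | succ k ih =>
    intro i best hik hinv
    rw [List.range'_succ, pvBOuter]
    have hilt : i < cs.length := by omega
    have hni : cs.length - i = k + 1 := by omega
    rcases hInner : pvBInner cs t i 1 (List.range' i (cs.length - i)) with _ | c
    · -- no match starting at i
      have hnoP : ∀ L, 1 ≤ L → i + L ≤ cs.length → ¬ pvP cs t i L := by
        intro L h1 h2
        exact pvBInner_none cs t i (cs.length - i) i 1 (le_refl i) (by omega)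
          (by simp [pvSub, pvHexProd]) hInner L h1 (by omega) h2
      apply ih (i + 1) best (by omega)
      cases best with
      | none =>
        intro L i' h1 h2 h3
        rcases Nat.lt_or_ge i' i with hlt | hge
        · exact hinv L i' h1 h2 hlt
        · have : i' = i := by omega
          subst this; exact hnoP L h1 h2
      | some x =>
        obtain ⟨g1, g2, g3, g4, g5⟩ := hinv
        refine ⟨g1, g2, by omega, g4, ?_⟩
        intro L i' h1 h2 h3 hP
        rcases Nat.lt_or_ge i' i with hlt | hge
        · exact g5 L i' h1 h2 hlt hP
        · have : i' = i := by omega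
          subst this; exact absurd hP (hnoP L h1 h2)
    · -- first match at start i is c = (j₀ - i + 1, i)
      obtain ⟨j₀, hj1, hj2, hc, hcP, hcmin⟩ :=
        pvBInner_some cs t i (cs.length - i) i 1 c (le_refl i) (by omega)
          (by simp [pvSub, pvHexProd]) hInner
      -- c is the lex-min match among matches starting exactly at i
      have hcStart : ∀ L, 1 ≤ L → i + L ≤ cs.length → pvP cs t i L → c.1 ≤ L := by
        intro L h1 h2 hP
        by_contra hcon
        have hc1 : c.1 = j₀ - i + 1 := by rw [hc]
        exact hcmin L h1 (by omega) (by omega) hP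
      have hcValid : 1 ≤ c.1 ∧ c.2 + c.1 ≤ cs.length ∧ c.2 = i ∧ pvP cs t c.2 c.1 := by
        rw [hc]; exact ⟨by omega, by omega, rfl, hcP⟩
      cases best with
      | none =>
        apply ih (i + 1) (some c) (by omega)
        refine ⟨hcValid.1, hcValid.2.1, by omega, hcValid.2.2.2, ?_⟩
        intro L i' h1 h2 h3 hP
        rcases Nat.lt_or_ge i' i with hlt | hge
        · exact absurd hP (hinv L i' h1 h2 hlt)
        · have hii : i' = i := by omega
          subst hii
          have := hcStart L h1 h2 hP
          have hc2 : c.2 = i' := hcValid.2.2.1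
          omega
      | some b =>
        obtain ⟨g1, g2, g3, g4, g5⟩ := hinv
        have hcase : ∀ x : Option (Nat × Nat),
            x = (if pvLess c b then some c else some b) →
            pvInv cs t (i + 1) x := by
          intro x hx
          have hbLe : pvLess c b = false → (b.1 < c.1 ∨ (b.1 = c.1 ∧ b.2 ≤ c.2)) := by
            intro hfalse
            have := (pvLess_iff c b)
            rw [hfalse] at this
            simp at this
            omega
          split at hx
          case isTrue htrue =>
            have hlt := (pvLess_iff c b).mp htrue
            subst hx
            refine ⟨hcValid.1, hcValid.2.1, by omega, hcValid.2.2.2, ?_⟩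
            intro L i' h1 h2 h3 hP
            rcases Nat.lt_or_ge i' i with hlt' | hge
            · have := g5 L i' h1 h2 hlt' hP
              omega
            · have hii : i' = i := by omega
              subst hii
              have := hcStart L h1 h2 hP
              have hc2 : c.2 = i' := hcValid.2.2.1
              omega
          case isFalse hfalse =>
            have hble := hbLe (by simpa using hfalse)
            subst hx
            refine ⟨g1, g2, by omega, g4, ?_⟩
            intro L i' h1 h2 h3 hP
            rcases Nat.lt_or_ge i' i with hlt' | hge
            · exact g5 L i' h1 h2 hlt' hP
            · have hii : i' = i := by omega
              subst hii
              have := hcStart L h1 h2 hP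
              have hc2 : c.2 = i' := hcValid.2.2.1
              omega
        apply ih (i + 1) _ (by omega)
        exact hcase _ rfl

-- ===== VERDICT (by name: the statement is the Claim_ definition above) =====

theorem find_hex_cluster_spec : Claim_equal_find_hex_cluster := by
  unfold Claim_equal_find_hex_cluster
  intro hs t _ _
  unfold Spec_find_hex_cluster
  set cs := hs.toList with hcs
  -- B computes the lex-min match
  have hB : pvIsBest cs t (pvBOuter cs t cs.length none (List.range cs.length)) := by
    rw [List.range_eq_range']
    exact pvBOuter_spec cs t cs.length 0 none (by omega) (by intro L i' _ _ h; omega)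
  simp only [find_hex_cluster, find_hex_cluster_alt, ← hcs]
  rcases hA : pvAOuter cs t cs.length (List.range' 1 cs.length) with _ | s
  · -- A found nothing: no match exists, so B finds nothing either
    have hAb : pvIsBest cs t (none : Option (Nat × Nat)) := by
      intro L i h1 h2
      exact pvAOuter_none cs t cs.length cs.length 1 (by omega) hA L i h1 (by omega) h2
    have := pvIsBest_unique cs t hAb hB
    rw [← this]
  · -- A found s = hex_string[i:i+L] with (L, i) the lex-min match
    obtain ⟨L, i, hL1, _, hLn, hP, hs', hminL, hmini⟩ :=
      pvAOuter_some cs t cs.length cs.length 1 s (by omega) hA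
    have hAb : pvIsBest cs t (some (L, i)) := by
      refine ⟨hL1, by omega, hP, ?_⟩
      intro L' i' h1 h2 hQ
      rcases Nat.lt_trichotomy L L' with h | h | h
      · exact Or.inl h
      · subst h
        rcases Nat.lt_or_ge i' i with hlt | hge
        · exact absurd hQ (hmini i' hlt)
        · exact Or.inr ⟨rfl, hge⟩
      · exact absurd hQ (hminL L' i' h1 h (by omega))
    have := pvIsBest_unique cs t hAb hB
    rw [← this, hs']
    simp only [pvSlice_eq_sub]
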